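-- pv_equiv track=rewrite | github.com/akii1234/StructIQ | modernization/impact_analyzer.py | _bfs_affected
-- ===== SOURCE A (Python) =====
-- from collections import deque
-- from typing import Any, Dict, List, Set
--
-- def _bfs_affected(
--     start_files: List[str],
--     adj: Dict[str, List[str]],
--     max_hops: int = 3,
-- ) -> Set[str]:
--     """BFS up to max_hops from start files to find affected nodes."""
--     visited: Set[str] = set()
--     q: deque[tuple[str, int]] = deque()
--     for f in start_files:
--         if f not in visited:
--             visited.add(f)
--             q.append((f, 0))
--     while q:
--         node, depth = q.popleft()
--         if depth >= max_hops:
--             continue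
--         for nei in adj.get(node, []):
--             if nei not in visited:
--                 visited.add(nei)
--                 q.append((nei, depth + 1))
--     return visited
-- ===== SOURCE B (Python) =====
-- def _bfs_affected(start_files, adj, max_hops=3):
--     """Naive fixed-point iteration (round-based closure): each round rescans the
--     WHOLE visited list in order and appends every unseen neighbour; stop after
--     max_hops rounds or when a round adds nothing."""
--     seen = set()
--     order = []
--     for f in start_files:
--         if f not in seen:
--             seen.add(f)
--             order.append(f)
--     for _ in range(max_hops):
--         before = len(order)
--         for node in order[:before]:
--             for nei in adj.get(node, []):
--                 if nei not in seen:
--                     seen.add(nei)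
--                     order.append(nei)
--         if len(order) == before:
--             break
--     return seen
-- ===== Notes on version B (the rewrite author's own statement) =====
-- stated objective: alternative
-- what changed: Replaced the depth-tagged FIFO BFS queue by a naive round-based closure iteration: each of up to max_hops rounds rescans the entire visited list so far and appends every unseen neighbour, stopping early when a round adds nothing; there is no queue, no frontier and no depth bookkeeping.
import Mathlib
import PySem

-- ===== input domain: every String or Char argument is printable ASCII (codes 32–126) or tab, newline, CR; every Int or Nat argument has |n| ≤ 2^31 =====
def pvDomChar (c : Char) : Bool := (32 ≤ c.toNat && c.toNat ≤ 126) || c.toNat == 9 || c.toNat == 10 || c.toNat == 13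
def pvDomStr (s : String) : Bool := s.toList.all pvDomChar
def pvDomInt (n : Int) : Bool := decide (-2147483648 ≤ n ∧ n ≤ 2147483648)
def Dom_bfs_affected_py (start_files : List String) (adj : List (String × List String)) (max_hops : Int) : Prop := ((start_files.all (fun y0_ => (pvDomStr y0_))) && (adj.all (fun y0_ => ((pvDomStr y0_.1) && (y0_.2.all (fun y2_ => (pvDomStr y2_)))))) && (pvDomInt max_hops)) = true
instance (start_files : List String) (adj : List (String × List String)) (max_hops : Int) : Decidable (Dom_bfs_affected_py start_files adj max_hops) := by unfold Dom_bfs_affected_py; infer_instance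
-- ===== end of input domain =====

-- B replaces A's depth-tagged FIFO BFS by a round-based naive closure iteration
-- (each round rescans the whole visited list and appends unseen neighbours).

-- ===== PORT A =====
-- 'adj.get(node, [])' where the Python dict is built from the association list
-- (later duplicate keys overwrite earlier ones, as dict(pairs) does): last match wins.
def pvAdjGet (adj : List (String × List String)) (node : String) : List String :=
  ((adj.reverse.find? (fun p => p.1 == node)).map Prod.snd).getD []

-- A's dedup-and-enqueue loop body: 'if x not in visited: visited.add(x); q.append((x, t))',
-- used for the start_files loop (t = 0) and the neighbour loop (t = depth + 1).
def pvA_enq (visited : PySem.Set String) (q : List (String × Int)) (t : Int)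
    (xs : List String) : PySem.Set String × List (String × Int) :=
  xs.foldl (fun st x =>
    if PySem.Set.contains st.1 x then st
    else (PySem.Set.add st.1 x, st.2 ++ [(x, t)])) (visited, q)

-- facts cited by the termination proof of the while loop below
theorem pvAdjGet_subset (adj : List (String × List String)) (node : String) :
    ∀ x ∈ pvAdjGet adj node, x ∈ adj.flatMap Prod.snd := by
  intro x hx
  unfold pvAdjGet at hx
  cases hfind : (adj.reverse.find? (fun p => p.1 == node)) with
  | none => simp [hfind] at hx
  | some p =>
    have hp : p ∈ adj.reverse := List.mem_of_find?_eq_some hfind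
    rw [List.mem_reverse] at hp
    simp only [hfind, Option.map_some, Option.getD_some] at hx
    exact List.mem_flatMap.2 ⟨p, hp, hx⟩

theorem pvA_enq_cons_mem (visited : PySem.Set String) (q : List (String × Int)) (t : Int)
    (x : String) (rest : List String) (h : x ∈ visited) :
    pvA_enq visited q t (x :: rest) = pvA_enq visited q t rest := by
  simp [pvA_enq, h]

theorem pvA_enq_cons_not (visited : PySem.Set String) (q : List (String × Int)) (t : Int)
    (x : String) (rest : List String) (h : x ∉ visited) :
    pvA_enq visited q t (x :: rest)
      = pvA_enq (PySem.Set.add visited x) (q ++ [(x, t)]) t rest := by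
  simp [pvA_enq, h]

theorem pvFilter_mono (U : List String) (p q : String → Bool)
    (h : ∀ a ∈ U, p a = true → q a = true) :
    (U.filter p).length ≤ (U.filter q).length := by
  rw [← List.countP_eq_length_filter, ← List.countP_eq_length_filter]
  exact List.countP_mono_left h

theorem pvFilter_lt (U : List String) (p q : String → Bool)
    (himp : ∀ s, q s = true → p s = true) (x : String) (hx : x ∈ U)
    (hpx : p x = true) (hqx : q x = false) :
    (U.filter q).length < (U.filter p).length := by
  induction U with
  | nil => cases hx
  | cons y ys ih =>
    rcases List.mem_cons.1 hx with rfl | hmem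
    · simp [hpx, hqx]
      have := pvFilter_mono ys q p (fun a _ hq => himp a hq)
      omega
    · have h := ih hmem
      by_cases hq : q y = true
      · simp [hq, himp y hq]
        omega
      · have hq' : q y = false := by cases hh : q y; rfl; exact absurd hh hq
        simp [List.filter_cons, hq']
        cases hp : p y <;> simp <;> omega

theorem pvA_enq_meas (U : List String) (t : Int) :
    ∀ (xs : List String) (visited : PySem.Set String) (q : List (String × Int)),
      (∀ x ∈ xs, x ∈ U) →
      (pvA_enq visited q t xs).2.length
        + (U.filter (fun s => !(decide (s ∈ (pvA_enq visited q t xs).1)))).length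
      ≤ q.length + (U.filter (fun s => !(decide (s ∈ visited)))).length := by
  intro xs
  induction xs with
  | nil => intro visited q _; simp [pvA_enq]
  | cons x rest ih =>
    intro visited q hsub
    have hrest : ∀ y ∈ rest, y ∈ U := fun y hy => hsub y (List.mem_cons_of_mem _ hy)
    by_cases hmem : x ∈ visited
    · rw [pvA_enq_cons_mem visited q t x rest hmem]
      exact ih visited q hrest
    · rw [pvA_enq_cons_not visited q t x rest hmem]
      have hlt : (U.filter (fun s => !(decide (s ∈ PySem.Set.add visited x)))).length
          < (U.filter (fun s => !(decide (s ∈ visited)))).length := by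
        refine pvFilter_lt U _ _ ?_ x (hsub x List.mem_cons_self) ?_ ?_
        · intro s hs; simp [PySem.Set.mem_add] at hs ⊢; tauto
        · simp [hmem]
        · simp [PySem.Set.mem_add]
      have := ih (PySem.Set.add visited x) (q ++ [(x, t)]) hrest
      simp only [List.length_append, List.length_cons, List.length_nil] at this ⊢
      omega

-- A's while loop over the depth-tagged queue
def bfs_affected_pyLoop (adj : List (String × List String)) (max_hops : Int)
    (visited : PySem.Set String) (q : List (String × Int)) : PySem.Set String :=
  match q with
  | [] => visited
  | (node, depth) :: rest =>
    if depth ≥ max_hops then bfs_affected_pyLoop adj max_hops visited rest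
    else
      let st := pvA_enq visited rest (depth + 1) (pvAdjGet adj node)
      bfs_affected_pyLoop adj max_hops st.1 st.2
termination_by ((adj.flatMap Prod.snd).filter (fun s => !(decide (s ∈ visited)))).length + q.length
decreasing_by
  · simp only [List.length_cons]; omega
  · have h := pvA_enq_meas (adj.flatMap Prod.snd) (depth + 1) (pvAdjGet adj node)
      visited rest (pvAdjGet_subset adj node)
    simp only [List.length_cons]
    omega

def bfs_affected_py (start_files : List String) (adj : List (String × List String)) (max_hops : Int) : List String :=
  let st := pvA_enq PySem.Set.empty [] 0 start_files
  bfs_affected_pyLoop adj max_hops st.1 st.2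

-- ===== PORT B =====
-- one round: 'for node in order[:before]: for nei in adj.get(node, []): if unseen: add'
-- (the snapshot order[:before] is the value of v before the round; Set.add is the
--  guarded 'if nei not in seen: seen.add(nei); order.append(nei)' — seen and order
--  move in lockstep, so both are the one PySem.Set)
def pvB_step (adj : List (String × List String)) (v : PySem.Set String) : PySem.Set String :=
  v.foldl (fun acc node =>
    (pvAdjGet adj node).foldl (fun a nei => PySem.Set.add a nei) acc) v

-- 'for _ in range(max_hops): …; if len(order) == before: break'
def pvB_rounds (adj : List (String × List String)) :
    Nat → PySem.Set String → PySem.Set String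
  | 0, v => v
  | n + 1, v =>
    let w := pvB_step adj v
    if w.length = v.length then w else pvB_rounds adj n w

def bfs_affected_py_alt (start_files : List String) (adj : List (String × List String)) (max_hops : Int) : List String :=
  pvB_rounds adj max_hops.toNat (PySem.Set.ofList start_files)

-- ===== PRECONDITION & SPEC =====
def Spec_bfs_affected_py (start_files : List String) (adj : List (String × List String)) (max_hops : Int) (out : List String) : Prop := out = bfs_affected_py_alt start_files adj max_hops
instance (start_files : List String) (adj : List (String × List String)) (max_hops : Int) (out : List String) : Decidable (Spec_bfs_affected_py start_files adj max_hops out) := by unfold Spec_bfs_affected_py; infer_instance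

-- ===== CLAIM (what is proved, stated in full; the proofs are below) =====
def Claim_equal_bfs_affected_py : Prop := ∀ (start_files : List String) (adj : List (String × List String)) (max_hops : Int), Dom_bfs_affected_py start_files adj max_hops → Spec_bfs_affected_py start_files adj max_hops (bfs_affected_py start_files adj max_hops)

-- ===== LEMMAS AND PROOFS =====

-- Proof-only intermediate: the level-synchronous (frontier) BFS, used as a bridge
-- between A's depth-tagged queue and B's round-based closure iteration.
def pvB_push (visited : PySem.Set String) (acc : List String) (xs : List String) :
    PySem.Set String × List String :=
  xs.foldl (fun st x =>
    if PySem.Set.contains st.1 x then st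
    else (PySem.Set.add st.1 x, st.2 ++ [x])) (visited, acc)

def pvB_expand (adj : List (String × List String)) (visited : PySem.Set String)
    (frontier : List String) : PySem.Set String × List String :=
  frontier.foldl (fun st node => pvB_push st.1 st.2 (pvAdjGet adj node)) (visited, [])

def pvB_levels (adj : List (String × List String)) :
    Nat → PySem.Set String → List String → PySem.Set String
  | 0, visited, _ => visited
  | _ + 1, visited, [] => visited
  | n + 1, visited, frontier =>
      let st := pvB_expand adj visited frontier
      pvB_levels adj n st.1 st.2

def pvB_expandAcc (adj : List (String × List String)) (visited : PySem.Set String)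
    (acc : List String) (frontier : List String) : PySem.Set String × List String :=
  frontier.foldl (fun st node => pvB_push st.1 st.2 (pvAdjGet adj node)) (visited, acc)

theorem pvB_push_cons_mem (visited : PySem.Set String) (acc : List String)
    (x : String) (rest : List String) (h : x ∈ visited) :
    pvB_push visited acc (x :: rest) = pvB_push visited acc rest := by
  simp [pvB_push, h]

theorem pvB_push_cons_not (visited : PySem.Set String) (acc : List String)
    (x : String) (rest : List String) (h : x ∉ visited) :
    pvB_push visited acc (x :: rest)
      = pvB_push (PySem.Set.add visited x) (acc ++ [x]) rest := by
  simp [pvB_push, h]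

theorem pvB_push_factor (xs : List String) :
    ∀ (visited : PySem.Set String) (a b : List String),
      pvB_push visited (a ++ b) xs
        = ((pvB_push visited b xs).1, a ++ (pvB_push visited b xs).2) := by
  induction xs with
  | nil => intro visited a b; simp [pvB_push]
  | cons x rest ih =>
    intro visited a b
    by_cases hmem : x ∈ visited
    · rw [pvB_push_cons_mem _ _ _ _ hmem, pvB_push_cons_mem _ _ _ _ hmem]
      exact ih visited a b
    · rw [pvB_push_cons_not _ _ _ _ hmem, pvB_push_cons_not _ _ _ _ hmem,
        List.append_assoc]
      exact ih (PySem.Set.add visited x) a (b ++ [x])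

theorem pvA_enq_eq_push (t : Int) (xs : List String) :
    ∀ (visited : PySem.Set String) (q : List (String × Int)),
      pvA_enq visited q t xs
        = ((pvB_push visited [] xs).1,
           q ++ (pvB_push visited [] xs).2.map (fun s => (s, t))) := by
  induction xs with
  | nil => intro visited q; simp [pvA_enq, pvB_push]
  | cons x rest ih =>
    intro visited q
    by_cases hmem : x ∈ visited
    · rw [pvA_enq_cons_mem _ _ _ _ _ hmem, pvB_push_cons_mem _ _ _ _ hmem]
      exact ih visited q
    · rw [pvA_enq_cons_not _ _ _ _ _ hmem, pvB_push_cons_not _ _ _ _ hmem]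
      rw [ih (PySem.Set.add visited x) (q ++ [(x, t)])]
      have hf := pvB_push_factor rest (PySem.Set.add visited x) [x] []
      simp only [List.append_nil, List.nil_append] at hf ⊢
      rw [hf]
      simp

theorem pvLoop_drain (adj : List (String × List String)) (max_hops : Int) :
    ∀ (q : List (String × Int)) (visited : PySem.Set String),
      (∀ p ∈ q, max_hops ≤ p.2) → bfs_affected_pyLoop adj max_hops visited q = visited := by
  intro q
  induction q with
  | nil => intro visited _; rw [bfs_affected_pyLoop]
  | cons p rest ih =>
    intro visited h
    obtain ⟨node, depth⟩ := p
    have hd : max_hops ≤ depth := h (node, depth) List.mem_cons_self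
    rw [bfs_affected_pyLoop]
    simp only [ge_iff_le, hd, if_pos]
    exact ih visited (fun p hp => h p (List.mem_cons_of_mem _ hp))

theorem pvLoop_level (adj : List (String × List String)) (max_hops : Int) (d : Int)
    (hd : d < max_hops) :
    ∀ (fr : List String) (visited : PySem.Set String) (pending : List String),
      bfs_affected_pyLoop adj max_hops visited
          (fr.map (fun s => (s, d)) ++ pending.map (fun s => (s, d + 1)))
        = bfs_affected_pyLoop adj max_hops (pvB_expandAcc adj visited pending fr).1
            ((pvB_expandAcc adj visited pending fr).2.map (fun s => (s, d + 1))) := by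
  intro fr
  induction fr with
  | nil => intro visited pending; simp [pvB_expandAcc]
  | cons f fs ih =>
    intro visited pending
    rw [List.map_cons, List.cons_append, bfs_affected_pyLoop]
    have hnot : ¬ (d ≥ max_hops) := by omega
    simp only [ge_iff_le, hnot, if_false]
    rw [pvA_enq_eq_push]
    have hmaps : (fs.map (fun s => (s, d)) ++ pending.map (fun s => (s, d + 1)))
          ++ (pvB_push visited [] (pvAdjGet adj f)).2.map (fun s => (s, d + 1))
        = fs.map (fun s => (s, d))
          ++ (pending ++ (pvB_push visited [] (pvAdjGet adj f)).2).map (fun s => (s, d + 1)) := by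
      rw [List.map_append, List.append_assoc]
    simp only [hmaps]
    rw [ih (pvB_push visited [] (pvAdjGet adj f)).1
        (pending ++ (pvB_push visited [] (pvAdjGet adj f)).2)]
    have hpush : pvB_push visited pending (pvAdjGet adj f)
        = ((pvB_push visited [] (pvAdjGet adj f)).1,
           pending ++ (pvB_push visited [] (pvAdjGet adj f)).2) := by
      have := pvB_push_factor (pvAdjGet adj f) visited pending []
      simpa using this
    have hcons : pvB_expandAcc adj visited pending (f :: fs)
        = pvB_expandAcc adj (pvB_push visited pending (pvAdjGet adj f)).1
            (pvB_push visited pending (pvAdjGet adj f)).2 fs := rfl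
    rw [hcons, hpush]

theorem pvLoop_eq_levels (adj : List (String × List String)) (max_hops : Int) :
    ∀ (n : Nat) (d : Int), (max_hops - d).toNat = n →
      ∀ (visited : PySem.Set String) (fr : List String),
        bfs_affected_pyLoop adj max_hops visited (fr.map (fun s => (s, d)))
          = pvB_levels adj n visited fr := by
  intro n
  induction n with
  | zero =>
    intro d hdn visited fr
    have hd : max_hops ≤ d := by omega
    rw [pvB_levels]
    apply pvLoop_drain
    intro p hp
    rcases List.mem_map.1 hp with ⟨s, _, rfl⟩
    exact hd
  | succ n ih =>
    intro d hdn visited fr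
    have hd : d < max_hops := by omega
    cases fr with
    | nil =>
      rw [pvB_levels, List.map_nil, bfs_affected_pyLoop]
    | cons f fs =>
      have h := pvLoop_level adj max_hops d hd (f :: fs) visited []
      simp only [List.map_nil, List.append_nil] at h
      rw [h]
      have hnext : (max_hops - (d + 1)).toNat = n := by omega
      rw [ih (d + 1) hnext]
      rfl

-- ===== levels = rounds =====

-- the set component of pvB_push is a plain fold of Set.add
theorem pvB_push_fst (xs : List String) :
    ∀ (visited : PySem.Set String) (acc : List String),
      (pvB_push visited acc xs).1 = xs.foldl (fun a x => PySem.Set.add a x) visited := by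
  induction xs with
  | nil => intro visited acc; simp [pvB_push]
  | cons x rest ih =>
    intro visited acc
    by_cases hmem : x ∈ visited
    · rw [pvB_push_cons_mem _ _ _ _ hmem, List.foldl_cons, PySem.Set.add_of_mem hmem]
      exact ih visited acc
    · rw [pvB_push_cons_not _ _ _ _ hmem, List.foldl_cons]
      exact ih (PySem.Set.add visited x) (acc ++ [x])

-- pvB_push appends the same fresh elements to the set and to the accumulator
theorem pvB_push_delta (xs : List String) :
    ∀ (visited : PySem.Set String) (acc : List String),
      ∃ d, pvB_push visited acc xs = (visited ++ d, acc ++ d) := by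
  induction xs with
  | nil => intro visited acc; exact ⟨[], by simp [pvB_push]⟩
  | cons x rest ih =>
    intro visited acc
    by_cases hmem : x ∈ visited
    · rw [pvB_push_cons_mem _ _ _ _ hmem]; exact ih visited acc
    · rw [pvB_push_cons_not _ _ _ _ hmem]
      obtain ⟨d, hd⟩ := ih (PySem.Set.add visited x) (acc ++ [x])
      refine ⟨x :: d, ?_⟩
      rw [hd, PySem.Set.add_of_not_mem hmem]
      simp

theorem pvB_expandAcc_delta (adj : List (String × List String)) (fr : List String) :
    ∀ (visited : PySem.Set String) (acc : List String),
      ∃ d, pvB_expandAcc adj visited acc fr = (visited ++ d, acc ++ d) := by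
  induction fr with
  | nil => intro visited acc; exact ⟨[], by simp [pvB_expandAcc]⟩
  | cons f fs ih =>
    intro visited acc
    obtain ⟨d1, hd1⟩ := pvB_push_delta (pvAdjGet adj f) visited acc
    have hcons : pvB_expandAcc adj visited acc (f :: fs)
        = pvB_expandAcc adj (pvB_push visited acc (pvAdjGet adj f)).1
            (pvB_push visited acc (pvAdjGet adj f)).2 fs := rfl
    obtain ⟨d2, hd2⟩ := ih (pvB_push visited acc (pvAdjGet adj f)).1
        (pvB_push visited acc (pvAdjGet adj f)).2
    refine ⟨d1 ++ d2, ?_⟩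
    rw [hcons, hd2, hd1]
    simp

-- everything in the old set stays; every neighbour scanned ends up in the set
theorem pvB_push_mono (xs : List String) :
    ∀ (visited : PySem.Set String) (acc : List String) (y : String), y ∈ visited →
      y ∈ (pvB_push visited acc xs).1 := by
  intro visited acc y hy
  obtain ⟨d, hd⟩ := pvB_push_delta xs visited acc
  rw [hd]; exact List.mem_append_left _ hy

theorem pvB_push_mem_self (xs : List String) :
    ∀ (visited : PySem.Set String) (acc : List String) (x : String), x ∈ xs →
      x ∈ (pvB_push visited acc xs).1 := by
  induction xs with
  | nil => intro _ _ _ h; cases h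
  | cons z rest ih =>
    intro visited acc x hx
    by_cases hmem : z ∈ visited
    · rw [pvB_push_cons_mem _ _ _ _ hmem]
      rcases List.mem_cons.1 hx with rfl | hx'
      · exact pvB_push_mono rest visited acc x hmem
      · exact ih visited acc x hx'
    · rw [pvB_push_cons_not _ _ _ _ hmem]
      rcases List.mem_cons.1 hx with rfl | hx'
      · exact pvB_push_mono rest _ _ x (by simp [PySem.Set.mem_add])
      · exact ih _ _ x hx'

theorem pvB_expandAcc_mono (adj : List (String × List String)) (fr : List String) :
    ∀ (visited : PySem.Set String) (acc : List String) (y : String), y ∈ visited →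
      y ∈ (pvB_expandAcc adj visited acc fr).1 := by
  intro visited acc y hy
  obtain ⟨d, hd⟩ := pvB_expandAcc_delta adj fr visited acc
  rw [hd]; exact List.mem_append_left _ hy

theorem pvB_expandAcc_closed (adj : List (String × List String)) (fr : List String) :
    ∀ (visited : PySem.Set String) (acc : List String) (node : String), node ∈ fr →
      ∀ x ∈ pvAdjGet adj node, x ∈ (pvB_expandAcc adj visited acc fr).1 := by
  induction fr with
  | nil => intro _ _ _ h; cases h
  | cons f fs ih =>
    intro visited acc node hnode x hx
    have hcons : pvB_expandAcc adj visited acc (f :: fs)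
        = pvB_expandAcc adj (pvB_push visited acc (pvAdjGet adj f)).1
            (pvB_push visited acc (pvAdjGet adj f)).2 fs := rfl
    rw [hcons]
    rcases List.mem_cons.1 hnode with rfl | hmem
    · exact pvB_expandAcc_mono adj fs _ _ x (pvB_push_mem_self _ _ _ x hx)
    · exact ih _ _ node hmem x hx

-- folding the neighbour-add over a closed prefix changes nothing
theorem pvB_step_closed_prefix (adj : List (String × List String)) (pre : List String) :
    ∀ (S acc : PySem.Set String),
      (∀ y ∈ S, y ∈ acc) →
      (∀ node ∈ pre, ∀ x ∈ pvAdjGet adj node, x ∈ S) →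
      pre.foldl (fun a node =>
        (pvAdjGet adj node).foldl (fun a nei => PySem.Set.add a nei) a) acc = acc := by
  induction pre with
  | nil => intro _ _ _ _; rfl
  | cons p ps ih =>
    intro S acc hSacc hcl
    have hinner : (pvAdjGet adj p).foldl (fun a nei => PySem.Set.add a nei) acc = acc := by
      have : ∀ xs : List String, (∀ x ∈ xs, x ∈ acc) →
          xs.foldl (fun a nei => PySem.Set.add a nei) acc = acc := by
        intro xs
        induction xs with
        | nil => intro _; rfl
        | cons z zs ihz =>
          intro hz
          rw [List.foldl_cons, PySem.Set.add_of_mem (hz z List.mem_cons_self)]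
          exact ihz (fun x hx => hz x (List.mem_cons_of_mem _ hx))
      exact this _ (fun x hx => hSacc x (hcl p List.mem_cons_self x hx))
    rw [List.foldl_cons, hinner]
    exact ih S acc hSacc (fun node hn => hcl node (List.mem_cons_of_mem _ hn))

-- folding the neighbour-add over the frontier is the set component of expand
theorem pvB_fold_eq_expandAcc (adj : List (String × List String)) (fr : List String) :
    ∀ (visited : PySem.Set String) (acc : List String),
      fr.foldl (fun a node =>
        (pvAdjGet adj node).foldl (fun a nei => PySem.Set.add a nei) a) visited
        = (pvB_expandAcc adj visited acc fr).1 := by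
  induction fr with
  | nil => intro visited acc; rfl
  | cons f fs ih =>
    intro visited acc
    have hcons : pvB_expandAcc adj visited acc (f :: fs)
        = pvB_expandAcc adj (pvB_push visited acc (pvAdjGet adj f)).1
            (pvB_push visited acc (pvAdjGet adj f)).2 fs := rfl
    rw [List.foldl_cons, hcons, ← ih (pvB_push visited acc (pvAdjGet adj f)).1
        (pvB_push visited acc (pvAdjGet adj f)).2, pvB_push_fst]

-- B's round on v = pre ++ fr (pre closed) is exactly the frontier expansion
theorem pvB_step_eq (adj : List (String × List String)) (pre fr : List String)
    (hcl : ∀ node ∈ pre, ∀ x ∈ pvAdjGet adj node, x ∈ pre ++ fr) :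
    pvB_step adj (pre ++ fr) = (pvB_expandAcc adj (pre ++ fr) [] fr).1 := by
  unfold pvB_step
  rw [List.foldl_append]
  rw [pvB_step_closed_prefix adj pre (pre ++ fr) (pre ++ fr) (fun y hy => hy) hcl]
  exact pvB_fold_eq_expandAcc adj fr (pre ++ fr) []

theorem pvB_levels_cons (adj : List (String × List String)) (n : Nat)
    (v : PySem.Set String) (f : String) (fs : List String) :
    pvB_levels adj (n + 1) v (f :: fs)
      = pvB_levels adj n (pvB_expand adj v (f :: fs)).1 (pvB_expand adj v (f :: fs)).2 := rfl

theorem pvB_levels_nil (adj : List (String × List String)) (n : Nat)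
    (v : PySem.Set String) : pvB_levels adj n v [] = v := by
  cases n <;> rw [pvB_levels]

theorem pvB_rounds_eq_levels (adj : List (String × List String)) :
    ∀ (n : Nat) (pre fr : List String),
      (∀ node ∈ pre, ∀ x ∈ pvAdjGet adj node, x ∈ pre ++ fr) →
      pvB_rounds adj n (pre ++ fr) = pvB_levels adj n (pre ++ fr) fr := by
  intro n
  induction n with
  | zero => intro pre fr _; rw [pvB_rounds, pvB_levels]
  | succ n ih =>
    intro pre fr hcl
    have hstep := pvB_step_eq adj pre fr hcl
    obtain ⟨F, hF⟩ := pvB_expandAcc_delta adj fr (pre ++ fr) []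
    rw [pvB_rounds, hstep, hF]
    cases fr with
    | nil =>
      -- frontier already empty: the round adds nothing, B breaks, levels return v
      have hF0 : F = [] := by
        have := congrArg Prod.snd hF
        simpa using this.symm
      subst hF0
      simp [pvB_levels_nil]
    | cons f fs =>
      rw [pvB_levels_cons]
      have hexp : pvB_expand adj (pre ++ f :: fs) (f :: fs)
          = pvB_expandAcc adj (pre ++ f :: fs) [] (f :: fs) := rfl
      rw [hexp, hF]
      simp only [List.nil_append]
      cases F with
      | nil =>
        -- nothing new: B breaks with v, levels recurse on the empty frontier
        simp [pvB_levels_nil]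
      | cons g gs =>
        have hlen : ¬ ((pre ++ f :: fs) ++ g :: gs).length = (pre ++ f :: fs).length := by
          simp
        rw [if_neg hlen]
        have hcl' : ∀ node ∈ pre ++ f :: fs, ∀ x ∈ pvAdjGet adj node,
            x ∈ (pre ++ f :: fs) ++ g :: gs := by
          intro node hn x hx
          rcases List.mem_append.1 hn with hp | hf
          · exact List.mem_append_left _ (hcl node hp x hx)
          · have := pvB_expandAcc_closed adj (f :: fs) (pre ++ f :: fs) [] node hf x hx
            rw [hF] at this
            simpa using this
        exact ih (pre ++ f :: fs) (g :: gs) hcl'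

-- ===== VERDICT (by name: the statement is the Claim_ definition above) =====
theorem bfs_affected_py_spec : Claim_equal_bfs_affected_py := by
  intro start_files adj max_hops _
  unfold Spec_bfs_affected_py bfs_affected_py bfs_affected_py_alt
  rw [pvA_enq_eq_push]
  simp only [List.nil_append]
  obtain ⟨d, hd⟩ := pvB_push_delta start_files PySem.Set.empty []
  have h1 : (pvB_push PySem.Set.empty [] start_files).1 = d := by
    rw [hd]; rfl
  have h2 : (pvB_push PySem.Set.empty [] start_files).2 = d := by
    rw [hd]; rfl
  have hofList : PySem.Set.ofList start_files = d := by
    have hfst := pvB_push_fst start_files PySem.Set.empty []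
    rw [h1] at hfst
    rw [PySem.Set.ofList_eq_foldl]
    exact hfst.symm
  rw [pvLoop_eq_levels adj max_hops max_hops.toNat 0 (by omega)
    (pvB_push PySem.Set.empty [] start_files).1
    (pvB_push PySem.Set.empty [] start_files).2]
  rw [h1, h2, hofList]
  have := pvB_rounds_eq_levels adj max_hops.toNat [] d (by intro node h; cases h)
  simpa using this.symm
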